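-- pv_equiv track=rewrite | github.com/KKosukeee/CodingQuestions | LeetCode/795_number_of_subarrays_with_bounded_maximum.py | dp
-- ===== SOURCE A (Python) =====
-- from typing import List
--
-- def dp(A: List[int], L: int, R: int) -> int:
--     """
--     DP solution that runs in O(N) and O(N) in runtime and space respectively
--
--     Args:
--         A(list[int]):
--         L(int):
--         R(int):
--
--     Returns:
--         int:
--
--     """
--     dp = [0] * (len(A) + 1)
--     last_invalid = -1
--     for i in range(len(A)):
--         # Maximum subarray ending at i is the previous max
--         if A[i] < L:
--             dp[i + 1] = dp[i]
--         # Maximum subarray ending at i doesn't exist.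
--         elif A[i] > R:
--             last_invalid = i
--         # Maximum subarray extends to i, increment current the diff to the result
--         else:
--             dp[i + 1] = i - last_invalid
--     return sum(dp)
-- ===== SOURCE B (Python) =====
-- def dp(A, L, R):
--     def count(bound):
--         cur = 0
--         total = 0
--         for a in A:
--             cur = cur + 1 if a <= bound else 0
--             total += cur
--         return total
--     return count(R) - count(L - 1)
-- ===== Notes on version B (the rewrite author's own statement) =====
-- stated objective: alternative
-- what changed: Replaces the dp-array/last_invalid single pass with two simple running-run-length counting passes: count(bound) counts subarrays with max <= bound, and the answer is count(R) - count(L-1).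
-- outside the precondition, e.g. on dp([1], 5, 0): A returns 0, B returns -1
import Mathlib
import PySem

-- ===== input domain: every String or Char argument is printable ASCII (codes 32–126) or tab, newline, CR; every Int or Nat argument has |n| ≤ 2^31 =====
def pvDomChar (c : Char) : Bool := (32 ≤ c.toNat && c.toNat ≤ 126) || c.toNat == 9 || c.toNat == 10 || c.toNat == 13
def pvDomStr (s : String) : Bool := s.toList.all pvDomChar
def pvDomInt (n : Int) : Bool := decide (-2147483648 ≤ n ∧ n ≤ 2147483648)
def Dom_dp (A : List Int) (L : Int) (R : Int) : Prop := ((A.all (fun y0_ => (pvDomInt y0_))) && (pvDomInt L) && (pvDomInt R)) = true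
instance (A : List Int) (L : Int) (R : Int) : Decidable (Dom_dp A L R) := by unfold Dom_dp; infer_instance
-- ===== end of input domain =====

-- B replaces A's dp-array/last_invalid pass with two run-length counting passes and a subtraction (alternative decomposition, same O(n) cost).


-- ===== PORT A =====
-- loop body of A's for-loop: state is (dp list, last_invalid)
def stepA (A : List Int) (L : Int) (R : Int) (st : List Int × Int) (i : Int) : List Int × Int :=
  let a := PySem.List.pyGetD A i 0   -- A[i]; i is always in range here, so pyGetD is exact
  if a < L then (PySem.List.pySetD st.1 (i + 1) (PySem.List.pyGetD st.1 i 0), st.2)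
  else if a > R then (st.1, i)
  else (PySem.List.pySetD st.1 (i + 1) (i - st.2), st.2)

def dp (A : List Int) (L : Int) (R : Int) : Int :=
  let st := (PySem.List.pyRange 0 (A.length : Int) 1).foldl (stepA A L R)
              (List.replicate (A.length + 1) 0, -1)
  st.1.sum

-- ===== PORT B =====
-- one counting pass: state is (cur, total); returns the number of subarrays with max <= bound
def stepB (bound : Int) (st : Int × Int) (a : Int) : Int × Int :=
  let cur := if a ≤ bound then st.1 + 1 else 0
  (cur, st.2 + cur)

def countLe (A : List Int) (bound : Int) : Int :=
  (A.foldl (stepB bound) (0, 0)).2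

def dp_alt (A : List Int) (L : Int) (R : Int) : Int :=
  countLe A R - countLe A (L - 1)

-- ===== PRECONDITION & SPEC =====
-- Pre_ asks that no element lie strictly between R and L; it holds for every input of the problem's
-- natural domain L ≤ R (LeetCode 795 guarantees it) and only excludes degenerate L > R inputs with an
-- element in (R, L), an unspecified corner where A happens to return 0 while B's subtraction goes negative.
def Pre_dp (A : List Int) (L : Int) (R : Int) : Prop := ∀ a ∈ A, a < L → a ≤ R
instance (A : List Int) (L : Int) (R : Int) : Decidable (Pre_dp A L R) := by unfold Pre_dp; infer_instance
def pvWitness_dp : List Int × Int × Int := ([2, 1, 4, 3], 2, 3)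

def Spec_dp (A : List Int) (L : Int) (R : Int) (out : Int) : Prop := out = dp_alt A L R
instance (A : List Int) (L : Int) (R : Int) (out : Int) : Decidable (Spec_dp A L R out) := by unfold Spec_dp; infer_instance

-- ===== CLAIM (what is proved, stated in full; the proofs are below) =====
def Claim_equal_dp : Prop := ∀ (A : List Int) (L : Int) (R : Int), Dom_dp A L R → Pre_dp A L R → Spec_dp A L R (dp A L R)

-- ===== LEMMAS AND PROOFS =====

-- loop invariant relating A's state (dp list, last_invalid) after n iterations to B's two
-- run-length counter states on the prefix of length n
def LoopInv (A : List Int) (L R : Int) (n : Nat) (st : List Int × Int) (bR bL : Int × Int) : Prop :=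
  st.1.length = A.length + 1 ∧
  (∀ j : Nat, n < j → st.1.getD j 0 = 0) ∧
  st.1.getD n 0 = bR.1 - bL.1 ∧
  st.1.sum = bR.2 - bL.2 ∧
  st.2 = (n : Int) - 1 - bR.1 ∧
  0 ≤ bR.1

theorem sum_set_int (l : List Int) (k : Nat) (v : Int) (hk : k < l.length) :
    (l.set k v).sum = l.sum + v - l.getD k 0 := by
  induction l generalizing k with
  | nil => simp at hk
  | cons x xs ih =>
    cases k with
    | zero => simp [List.getD]; ring
    | succ k =>
      simp only [List.set, List.sum_cons, List.getD_cons_succ]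
      rw [ih k (by simpa using hk)]
      ring

theorem step_preserve (A : List Int) (L R : Int) (n : Nat) (hn : n < A.length)
    (hA : A[n] < L → A[n] ≤ R)
    (st : List Int × Int) (bR bL : Int × Int) (h : LoopInv A L R n st bR bL) :
    LoopInv A L R (n + 1) (stepA A L R st (n : Int)) (stepB R bR A[n]) (stepB (L - 1) bL A[n]) := by
  obtain ⟨hlen, hzero, hlast, hsum, hli, hpos⟩ := h
  have ha : PySem.List.pyGetD A (n : Int) 0 = A[n] := by
    rw [PySem.List.pyGetD_natCast]
    simp [List.getD_eq_getElem?_getD, List.getElem?_eq_getElem hn]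
  have hget_n : PySem.List.pyGetD st.1 (n : Int) 0 = st.1.getD n 0 :=
    PySem.List.pyGetD_natCast st.1 n 0
  have hsetc : ((n : Int) + 1) = ((n + 1 : Nat) : Int) := by push_cast; ring
  have hset : ∀ v : Int, PySem.List.pySetD st.1 ((n : Int) + 1) v = st.1.set (n + 1) v := by
    intro v; rw [hsetc, PySem.List.pySetD_natCast]
  have hidx : n + 1 < st.1.length := by omega
  have hcurid : st.1.getD (n + 1) 0 = 0 := hzero (n + 1) (by omega)
  unfold LoopInv stepA stepB
  simp only [ha, hget_n]
  by_cases h1 : A[n] < L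
  · -- a < L : dp[n+1] = dp[n]; both run counters increment
    have h2 : A[n] ≤ R := hA h1
    simp only [if_pos h1, if_pos h2, if_pos (by omega : A[n] ≤ L - 1)]
    rw [hset]
    refine ⟨by simp [hlen], ?_, ?_, ?_, ?_, by omega⟩
    · intro j hj
      rw [List.getD_eq_getElem?_getD, List.getElem?_set_ne (by omega),
          ← List.getD_eq_getElem?_getD]
      exact hzero j (by omega)
    · rw [List.getD_eq_getElem?_getD, List.getElem?_set_self hidx]
      simpa [List.getD_eq_getElem?_getD] using hlast
    · rw [sum_set_int _ _ _ hidx, hcurid, hsum, hlast]; ring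
    · rw [hli]; push_cast; ring
  · by_cases h2 : A[n] > R
    · -- a > R : last_invalid = n; both run counters reset (A[n] ≥ L > L - 1)
      have h3 : ¬ A[n] ≤ R := by omega
      have h4 : ¬ A[n] ≤ L - 1 := by omega
      simp only [if_neg h1, if_pos h2, if_neg h3, if_neg h4]
      refine ⟨hlen, ?_, ?_, by rw [hsum]; ring, by push_cast; ring, le_refl 0⟩
      · intro j hj; exact hzero j (by omega)
      · simpa using hzero (n + 1) (by omega)
    · -- L ≤ a ≤ R : dp[n+1] = n - last_invalid; R-counter increments, (L-1)-counter resets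
      have h3 : A[n] ≤ R := by omega
      have h4 : ¬ A[n] ≤ L - 1 := by omega
      simp only [if_neg h1, if_neg h2, if_pos h3, if_neg h4]
      rw [hset]
      refine ⟨by simp [hlen], ?_, ?_, ?_, ?_, by omega⟩
      · intro j hj
        rw [List.getD_eq_getElem?_getD, List.getElem?_set_ne (by omega),
            ← List.getD_eq_getElem?_getD]
        exact hzero j (by omega)
      · rw [List.getD_eq_getElem?_getD, List.getElem?_set_self hidx]
        simp [hli]; ring
      · rw [sum_set_int _ _ _ hidx, hcurid, hsum, hli]; ring
      · rw [hli]; push_cast; ring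

theorem invariant (A : List Int) (L R : Int) (hPre : ∀ a ∈ A, a < L → a ≤ R) (n : Nat) (hn : n ≤ A.length) :
    LoopInv A L R n
      ((PySem.List.pyRange 0 (n : Int) 1).foldl (stepA A L R) (List.replicate (A.length + 1) 0, -1))
      ((A.take n).foldl (stepB R) (0, 0))
      ((A.take n).foldl (stepB (L - 1)) (0, 0)) := by
  induction n with
  | zero =>
    unfold LoopInv
    simp [PySem.List.pyRange_one_eq_nil, List.getD_eq_getElem?_getD]
  | succ n ih =>
    have hnlt : n < A.length := hn
    have hcast : ((n + 1 : Nat) : Int) = (n : Int) + 1 := by push_cast; ring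
    have htake : A.take (n + 1) = A.take n ++ [A[n]] := by
      rw [List.take_add_one]
      simp [List.getElem?_eq_getElem hnlt]
    rw [hcast, PySem.List.pyRange_one_succ_right (by positivity), htake]
    simp only [List.foldl_append, List.foldl_cons, List.foldl_nil]
    exact step_preserve A L R n hnlt (hPre A[n] (A.getElem_mem hnlt)) _ _ _ (ih (Nat.le_of_succ_le hn))

-- ===== VERDICT (by name: the statement is the Claim_ definition above) =====
theorem dp_spec : Claim_equal_dp := by
  intro A L R _hDom hPre
  unfold Spec_dp dp dp_alt countLe
  obtain ⟨_, _, _, hsum, _, _⟩ := invariant A L R hPre A.length (le_refl _)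
  simpa using hsum
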